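-- pv_equiv track=rewrite | github.com/1349636970/cs110a | Ch14-EXTRA.py | check_veritical
-- ===== SOURCE A (Python) =====
-- def check_veritical(board):
--     vertical_values = []
--     count = 0
--     winner = None
--     for row in range(len(board)):
--         for column in range(len(board)):
--                 vertical_values.append(board[column][row])
--         for vertical_value in range(1,len(vertical_values)):
--             if " " not in vertical_values and vertical_values[vertical_value-1] == vertical_values[vertical_value]:
--                 count += 1
--         if count == len(board)-1:
--             winner = vertical_values[0]
--             break
--         vertical_values = []
--         count = 0
--     return winner
-- ===== SOURCE B (Python) =====
-- def check_veritical(board):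
--     n = len(board)
--     for r in range(n):
--         first = board[0][r]
--         if first != " " and all(board[c][r] == first for c in range(1, n)):
--             return first
--     return None
-- ===== Notes on version B (the rewrite author's own statement) =====
-- stated objective: alternative
-- what changed: B replaces A's per-column rebuild of the whole column list followed by a pair-counting pass (with a repeated ' ' membership scan inside the counting loop) by a single all-equal-to-first scan per column with an early return.
-- intended difference: On a 1x1 board whose only cell is the blank " ", A returns " " (its no-blank test never runs for a one-cell column) while B returns None; a blank cell is an empty square, not a winner, so B's answer is the intended one. — e.g. on check_veritical([[" "]]): A returns some " ", B returns none
-- outside the precondition, e.g. on check_veritical([['x', 'x'], ['x']]): A returns 'x', B returns 'x'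
import Mathlib
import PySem

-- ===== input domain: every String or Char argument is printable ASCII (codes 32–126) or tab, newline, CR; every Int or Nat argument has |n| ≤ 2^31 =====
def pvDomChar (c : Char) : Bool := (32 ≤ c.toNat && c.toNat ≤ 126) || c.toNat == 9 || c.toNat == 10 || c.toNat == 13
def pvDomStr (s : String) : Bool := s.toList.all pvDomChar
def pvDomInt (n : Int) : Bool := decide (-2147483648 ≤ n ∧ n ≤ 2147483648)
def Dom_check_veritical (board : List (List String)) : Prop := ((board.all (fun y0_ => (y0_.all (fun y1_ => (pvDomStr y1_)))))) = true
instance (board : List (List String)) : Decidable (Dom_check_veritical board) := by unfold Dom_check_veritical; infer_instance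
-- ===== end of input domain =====

-- B replaces A's rebuild-the-column-then-count-adjacent-pairs loops by a single all-equal scan
-- per column (objective: alternative; no column list is rebuilt and no pair counting pass).

-- ===== PORT A =====
-- board[column][row] is ported with pyGetD; the default "" is never reached on Pre_.
def pvA_vv (board : List (List String)) (row : Nat) : List String :=
  (List.range board.length).foldl
    (fun acc (column : Nat) =>
      acc ++ [PySem.List.pyGetD (PySem.List.pyGetD board (column : Int) []) (row : Int) ""]) []

def pvA_count (vv : List String) : Int :=
  (PySem.List.pyRange 1 (vv.length : Int)).foldl
    (fun count i =>
      if ¬ (" " ∈ vv) ∧ PySem.List.pyGetD vv (i - 1) "" = PySem.List.pyGetD vv i "" then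
        count + 1
      else count) 0

def pvA_loop (board : List (List String)) : List Nat → Option String
  | [] => none
  | row :: rest =>
      if pvA_count (pvA_vv board row) = (board.length : Int) - 1 then
        some (PySem.List.pyGetD (pvA_vv board row) 0 "")
      else pvA_loop board rest

def check_veritical (board : List (List String)) : Option String :=
  pvA_loop board (List.range board.length)

-- ===== PORT B =====
def pvB_first (board : List (List String)) (r : Nat) : String :=
  PySem.List.pyGetD (PySem.List.pyGetD board ((0 : Nat) : Int) []) (r : Int) ""

def pvB_loop (board : List (List String)) : List Nat → Option String
  | [] => none
  | r :: rest =>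
      if pvB_first board r ≠ " " ∧
          ((List.range' 1 (board.length - 1)).all
            (fun c => PySem.List.pyGetD (PySem.List.pyGetD board (c : Int) []) (r : Int) "" == pvB_first board r)) = true then
        some (pvB_first board r)
      else pvB_loop board rest

def check_veritical_alt (board : List (List String)) : Option String :=
  pvB_loop board (List.range board.length)

-- ===== PRECONDITION & SPEC =====
-- Pre_ excludes jagged boards with a row shorter than the board, on which A's indexing in general
-- raises IndexError (on a few of them an early winning column returns before the short row is read).
def Pre_check_veritical (board : List (List String)) : Prop :=
  ∀ row ∈ board, board.length ≤ row.length
instance (board : List (List String)) : Decidable (Pre_check_veritical board) := by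
  unfold Pre_check_veritical; infer_instance

def pvWitness_check_veritical : List (List String) := [["x", "y"], ["x", "z"]]

-- On single-column boards whose only cell is the blank " ", A returns " " (its no-blank test never
-- runs for a one-cell column) while B returns none; a blank cell is an empty square, not a winner,
-- so B's answer is the intended one.
def D_check_veritical (board : List (List String)) : Prop :=
  board.length = 1 ∧ (board.headD []).headD "" = " "
instance (board : List (List String)) : Decidable (D_check_veritical board) := by
  unfold D_check_veritical; infer_instance

def Spec_check_veritical (board : List (List String)) (out : Option String) : Prop :=
  ¬ D_check_veritical board → out = check_veritical_alt board
instance (board : List (List String)) (out : Option String) : Decidable (Spec_check_veritical board out) := by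
  unfold Spec_check_veritical; infer_instance

def pvDiffWitness_check_veritical : List (List String) := [[" "]]
def pvDiffWitnessOut_check_veritical : (Option String) × (Option String) := (some " ", none)

-- ===== CLAIM (what is proved, stated in full; the proofs are below) =====
def Claim_unchanged_check_veritical : Prop := ∀ (board : List (List String)), Dom_check_veritical board → Pre_check_veritical board → Spec_check_veritical board (check_veritical board)
def Claim_changed_check_veritical : Prop := Dom_check_veritical (pvDiffWitness_check_veritical) ∧ Pre_check_veritical (pvDiffWitness_check_veritical) ∧ D_check_veritical (pvDiffWitness_check_veritical) ∧ check_veritical (pvDiffWitness_check_veritical) = pvDiffWitnessOut_check_veritical.1 ∧ check_veritical_alt (pvDiffWitness_check_veritical) = pvDiffWitnessOut_check_veritical.2 ∧ pvDiffWitnessOut_check_veritical.1 ≠ pvDiffWitnessOut_check_veritical.2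
def Claim_exact_check_veritical : Prop := ∀ (board : List (List String)), Dom_check_veritical board → Pre_check_veritical board → D_check_veritical board → check_veritical board ≠ check_veritical_alt board

-- ===== LEMMAS AND PROOFS =====

-- the cell board[c][r] as both ports read it
def pvCell (board : List (List String)) (c r : Nat) : String :=
  PySem.List.pyGetD (PySem.List.pyGetD board (c : Int) []) (r : Int) ""

lemma len_pyRange_one (n : Nat) : (PySem.List.pyRange 1 (n : Int)).length = n - 1 := by
  simp [PySem.List.pyRange]; omega

lemma pvA_vv_eq_map (board : List (List String)) (r : Nat) :
    pvA_vv board r = (List.range board.length).map (fun c => pvCell board c r) := by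
  unfold pvA_vv
  rw [PySem.List.foldl_append_singleton_eq_map]
  rfl

lemma pvA_vv_len (board : List (List String)) (r : Nat) :
    (pvA_vv board r).length = board.length := by
  rw [pvA_vv_eq_map]; simp

lemma vv_getD (board : List (List String)) (r k : Nat) (hk : k < board.length) :
    PySem.List.pyGetD (pvA_vv board r) (k : Int) "" = pvCell board k r := by
  rw [PySem.List.pyGetD_natCast, pvA_vv_eq_map, PySem.List.getD_map_range _ _ _ _ hk]

lemma acond_iff (board : List (List String)) (r : Nat) (hn : 1 ≤ board.length) :
    (pvA_count (pvA_vv board r) = (board.length : Int) - 1) ↔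
      (∀ i : Nat, 1 ≤ i → i < board.length →
        ((¬ (" " ∈ pvA_vv board r)) ∧ pvCell board (i - 1) r = pvCell board i r)) := by
  set n := board.length with hnn
  set vv := pvA_vv board r with hvv
  have hlen : vv.length = n := pvA_vv_len board r
  unfold pvA_count
  rw [hlen]
  rw [PySem.List.foldl_ite_add_one
    (p := fun i => ¬ (" " ∈ vv) ∧ PySem.List.pyGetD vv (i - 1) "" = PySem.List.pyGetD vv i "")]
  have hcle : (List.countP (fun i => decide (¬ (" " ∈ vv) ∧ PySem.List.pyGetD vv (i - 1) "" = PySem.List.pyGetD vv i "")) (PySem.List.pyRange 1 (n : Int))) ≤ n - 1 := by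
    rw [← len_pyRange_one n]; exact List.countP_le_length
  constructor
  · intro h i h1 hi
    have hc : (List.countP (fun i => decide (¬ (" " ∈ vv) ∧ PySem.List.pyGetD vv (i - 1) "" = PySem.List.pyGetD vv i "")) (PySem.List.pyRange 1 (n : Int))) = n - 1 := by omega
    have hall := (List.countP_eq_length (l := PySem.List.pyRange 1 (n : Int))).mp (by rw [hc, len_pyRange_one])
    have := hall (i : Int) (PySem.List.mem_pyRange_one.mpr ⟨by exact_mod_cast h1, by exact_mod_cast hi⟩)
    simp only [decide_eq_true_eq] at this
    obtain ⟨hs, he⟩ := this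
    refine ⟨hs, ?_⟩
    have h1i : ((i : Int) - 1) = ((i - 1 : Nat) : Int) := by omega
    rw [h1i, vv_getD board r (i-1) (by omega), vv_getD board r i hi] at he
    exact he
  · intro h
    have hall : ∀ x ∈ PySem.List.pyRange 1 (n : Int),
        (fun i => decide (¬ (" " ∈ vv) ∧ PySem.List.pyGetD vv (i - 1) "" = PySem.List.pyGetD vv i "")) x = true := by
      intro x hx
      obtain ⟨hx1, hx2⟩ := PySem.List.mem_pyRange_one.mp hx
      have hk : x = ((x.toNat : Nat) : Int) := by omega
      obtain ⟨hs, he⟩ := h x.toNat (by omega) (by omega)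
      simp only [decide_eq_true_eq]
      refine ⟨hs, ?_⟩
      rw [hk]
      have h1i : (((x.toNat : Nat) : Int) - 1) = ((x.toNat - 1 : Nat) : Int) := by omega
      rw [h1i, vv_getD board r (x.toNat - 1) (by omega), vv_getD board r x.toNat (by omega)]
      exact he
    have := List.countP_eq_length.mpr hall
    rw [this, len_pyRange_one]
    omega

lemma first_eq_cell (board : List (List String)) (r : Nat) :
    pvB_first board r = pvCell board 0 r := rfl

lemma not_space_iff (board : List (List String)) (r : Nat) :
    (¬ (" " ∈ pvA_vv board r)) ↔ ∀ c : Nat, c < board.length → pvCell board c r ≠ " " := by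
  rw [pvA_vv_eq_map]
  constructor
  · intro h c hc he
    exact h (he ▸ List.mem_map.mpr ⟨c, List.mem_range.mpr hc, rfl⟩)
  · intro h hm
    obtain ⟨c, hc, he⟩ := List.mem_map.mp hm
    exact h c (List.mem_range.mp hc) he

lemma bcond_all_iff (board : List (List String)) (r : Nat) :
    ((List.range' 1 (board.length - 1)).all
      (fun c => PySem.List.pyGetD (PySem.List.pyGetD board (c : Int) []) (r : Int) "" == pvB_first board r)) = true ↔
    (∀ c : Nat, 1 ≤ c → c < board.length → pvCell board c r = pvB_first board r) := by
  rw [List.all_eq_true]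
  constructor
  · intro h c h1 hc
    have := h c (List.mem_range'_1.mpr ⟨h1, by omega⟩)
    exact eq_of_beq this
  · intro h c hc
    obtain ⟨h1, h2⟩ := List.mem_range'_1.mp hc
    exact beq_iff_eq.mpr (h c h1 (by omega))

lemma chain_iff_all (f : Nat → String) (n : Nat) :
    (∀ i : Nat, 1 ≤ i → i < n → f (i - 1) = f i) ↔ (∀ i : Nat, 1 ≤ i → i < n → f i = f 0) := by
  induction n with
  | zero => simp
  | succ m ih =>
    constructor
    · intro h i h1 hi
      induction i with
      | zero => omega
      | succ j ihj =>
        rcases Nat.eq_zero_or_pos j with hj | hj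
        · subst hj
          exact (h 1 le_rfl (by omega)).symm
        · have := h (j+1) (by omega) (by omega)
          simp at this
          rw [← this]
          exact ihj (by omega) (by omega)
    · intro h i h1 hi
      rcases Nat.eq_zero_or_pos (i-1) with hj | hj
      · rw [hj, ← h i h1 hi]
      · rw [h (i-1) hj (by omega), h i h1 hi]

lemma step_iff (board : List (List String)) (r : Nat) (hn : 1 ≤ board.length)
    (h1 : board.length = 1 → pvB_first board r ≠ " ") :
    (pvA_count (pvA_vv board r) = (board.length : Int) - 1 ↔
      (pvB_first board r ≠ " " ∧
        ((List.range' 1 (board.length - 1)).all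
          (fun c => PySem.List.pyGetD (PySem.List.pyGetD board (c : Int) []) (r : Int) "" == pvB_first board r)) = true)) := by
  rw [acond_iff board r hn, bcond_all_iff]
  rcases Nat.lt_or_ge 1 board.length with h2 | h2
  · -- two or more columns
    constructor
    · intro h
      have hs := (h 1 le_rfl h2).1
      have hchain : ∀ i : Nat, 1 ≤ i → i < board.length → pvCell board i r = pvCell board 0 r :=
        (chain_iff_all (fun c => pvCell board c r) board.length).mp (fun i hi1 hi2 => (h i hi1 hi2).2)
      refine ⟨?_, fun c h1c hc => (hchain c h1c hc).trans (first_eq_cell board r).symm⟩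
      rw [first_eq_cell]
      exact (not_space_iff board r).mp hs 0 hn
    · intro ⟨hf, hall⟩
      have hns : ¬ (" " ∈ pvA_vv board r) := by
        rw [not_space_iff]
        intro c hc
        rcases Nat.eq_zero_or_pos c with h0 | h0
        · subst h0; rw [← first_eq_cell]; exact hf
        · rw [hall c h0 hc]; exact hf
      intro i h1i hi
      refine ⟨hns, ?_⟩
      have hi' := hall i h1i hi
      rcases Nat.eq_zero_or_pos (i - 1) with h0 | h0
      · rw [h0, hi', first_eq_cell]
      · rw [hall (i-1) h0 (by omega), hi']
  · -- exactly one column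
    have hn1 : board.length = 1 := by omega
    constructor
    · intro _
      refine ⟨h1 hn1, fun c h1c hc => by omega⟩
    · intro _ i h1i hi
      omega

lemma head_eq (board : List (List String)) (r : Nat) (hn : 1 ≤ board.length) :
    PySem.List.pyGetD (pvA_vv board r) 0 "" = pvB_first board r := by
  have : ((0 : Nat) : Int) = (0 : Int) := rfl
  rw [← this, vv_getD board r 0 hn, first_eq_cell]

lemma loop_eq (board : List (List String)) (hn : 1 ≤ board.length) :
    ∀ l : List Nat, (∀ r ∈ l, board.length = 1 → pvB_first board r ≠ " ") →
      pvA_loop board l = pvB_loop board l := by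
  intro l
  induction l with
  | nil => intro _; rfl
  | cons r rest ih =>
    intro h
    have hiff := step_iff board r hn (h r List.mem_cons_self)
    simp only [pvA_loop, pvB_loop]
    by_cases hb : (pvB_first board r ≠ " " ∧
        ((List.range' 1 (board.length - 1)).all
          (fun c => PySem.List.pyGetD (PySem.List.pyGetD board (c : Int) []) (r : Int) "" == pvB_first board r)) = true)
    · rw [if_pos (hiff.mpr hb), if_pos hb, head_eq board r hn]
    · rw [if_neg (fun ha => hb (hiff.mp ha)), if_neg hb]
      exact ih (fun x hx => h x (List.mem_cons_of_mem _ hx))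

lemma getD0 {α : Type} (l : List α) (d : α) : PySem.List.pyGetD l ((0:Nat):Int) d = l.headD d := by
  rw [PySem.List.pyGetD_natCast]; cases l <;> simp

lemma first0 (board : List (List String)) :
    pvB_first board 0 = (board.headD []).headD "" := by
  unfold pvB_first
  rw [getD0, getD0]

lemma one_col_A (board : List (List String)) (hn1 : board.length = 1) :
    check_veritical board = some (pvB_first board 0) := by
  unfold check_veritical
  rw [show List.range board.length = [0] by rw [hn1]; rfl]
  simp only [pvA_loop]
  rw [if_pos, head_eq board 0 (by omega)]
  unfold pvA_count
  rw [pvA_vv_len, hn1]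
  rw [show PySem.List.pyRange 1 (((1:Nat)):Int) = [] from by decide]
  simp

lemma one_col_B (board : List (List String)) (hn1 : board.length = 1)
    (hsp : (board.headD []).headD "" = " ") : check_veritical_alt board = none := by
  unfold check_veritical_alt
  rw [show List.range board.length = [0] by rw [hn1]; rfl]
  simp only [pvB_loop]
  rw [if_neg (fun h => h.1 (by rw [first0, hsp]))]

-- ===== VERDICT (by name: the statement is the Claim_ definition above) =====
theorem check_veritical_spec : Claim_unchanged_check_veritical := by
  intro board _ _ hnd
  rcases Nat.eq_zero_or_pos board.length with h0 | h0
  · unfold check_veritical check_veritical_alt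
    rw [show List.range board.length = [] by rw [h0]; rfl]
    rfl
  · apply loop_eq board h0
    intro r hr hn1
    have hr0 : r = 0 := by have := List.mem_range.mp hr; omega
    subst hr0
    rw [first0]
    intro he
    exact hnd ⟨hn1, he⟩

theorem check_veritical_changed : Claim_changed_check_veritical := by
  unfold Claim_changed_check_veritical; decide

theorem check_veritical_tight : Claim_exact_check_veritical := by
  intro board _ _ hd
  obtain ⟨hn1, hsp⟩ := hd
  rw [one_col_A board hn1, one_col_B board hn1 hsp]
  simp
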